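-- pv_equiv track=rewrite | github.com/jeffshih/countSimulator | Util.py | transform
-- ===== SOURCE A (Python) =====
-- def transform(l : list):
--     res = {}
--     for det in l:
--         imgIdx = det.split(",")[1]
--         if imgIdx not in res:
--             res[imgIdx] = [det]
--         else:
--             res[imgIdx].append(det)
--     return res
-- ===== SOURCE B (Python) =====
-- def transform(l : list):
--     pairs = [(det.split(",")[1], det) for det in l]
--     seen = []
--     for k, _ in pairs:
--         if k not in seen:
--             seen.append(k)
--     return {k: [det for k2, det in pairs if k2 == k] for k in seen}
-- ===== Notes on version B (the rewrite author's own statement) =====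
-- stated objective: alternative
-- what changed: B precomputes the (key, row) pair list, collects the distinct keys in first-appearance order, and builds each group by one filter pass over the pairs per key, instead of A's single-pass dict insert/append loop.
import Mathlib
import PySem

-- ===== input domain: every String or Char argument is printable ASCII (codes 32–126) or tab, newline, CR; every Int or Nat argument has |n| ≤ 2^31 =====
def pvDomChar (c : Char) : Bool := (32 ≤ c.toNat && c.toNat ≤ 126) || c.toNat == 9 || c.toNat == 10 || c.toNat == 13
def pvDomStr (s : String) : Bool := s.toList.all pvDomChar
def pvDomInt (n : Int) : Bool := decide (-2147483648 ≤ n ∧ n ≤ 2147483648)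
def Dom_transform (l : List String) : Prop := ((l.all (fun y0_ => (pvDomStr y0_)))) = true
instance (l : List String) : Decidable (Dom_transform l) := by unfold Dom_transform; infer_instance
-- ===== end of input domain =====

-- B groups rows by their second CSV field via distinct-keys + per-key filter instead of A's
-- incremental dict insert/append loop; same return value (alternative decomposition, no speed claim).

-- ===== PORT A =====
-- det.split(",")[1]; the getD "" default is unreachable under Pre_transform (every string has a comma)
def pvKey (det : String) : String := ((PySem.List.pyGet? ((PySem.Str.split? det ",").getD []) 1).getD "")

def transform (l : List String) : List (String × List String) :=
  (l.foldl (fun res det =>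
      let imgIdx := pvKey det
      if !(res.contains imgIdx) then res.insert imgIdx [det]
      else res.modify imgIdx [] (· ++ [det]))
    (PySem.Dict.empty : PySem.Dict String (List String))).items

-- ===== PORT B =====
def transform_alt (l : List String) : List (String × List String) :=
  let pairs := l.map (fun det => (pvKey det, det))
  let seen := pairs.foldl (fun s p => if s.contains p.1 then s else s ++ [p.1]) ([] : List String)
  seen.map (fun k => (k, (pairs.filter (fun p => p.1 == k)).map (·.2)))

-- ===== PRECONDITION & SPEC =====
-- Pre_ excludes exactly the inputs where Python A raises IndexError: a string with no comma
-- (det.split(",")[1] out of range).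
def Pre_transform (l : List String) : Prop := (l.all (fun s => s.toList.contains ',')) = true
instance (l : List String) : Decidable (Pre_transform l) := by unfold Pre_transform; infer_instance
def pvWitness_transform : List String := ["1,a", "2,b", "3,a", "4,b,z"]

def Spec_transform (l : List String) (out : List (String × List String)) : Prop := out = transform_alt l
instance (l : List String) (out : List (String × List String)) : Decidable (Spec_transform l out) := by unfold Spec_transform; infer_instance

-- ===== CLAIM (what is proved, stated in full; the proofs are below) =====
def Claim_equal_transform : Prop := ∀ (l : List String), Dom_transform l → Pre_transform l → Spec_transform l (transform l)

-- ===== LEMMAS AND PROOFS =====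

-- A's branching loop step is exactly an unconditional `modify`
theorem pv_step_eq (d : PySem.Dict String (List String)) (k : String) (v : String) :
    (if !(d.contains k) then d.insert k [v] else d.modify k [] (· ++ [v]))
      = d.modify k [] (· ++ [v]) := by
  by_cases h : d.contains k = true
  · simp [h]
  · simp only [Bool.not_eq_true] at h
    simp [h, PySem.Dict.modify, PySem.Dict.getD_of_not_contains _ _ h]

theorem pv_foldl_eq (l : List String) (d : PySem.Dict String (List String)) :
    l.foldl (fun res det =>
        let imgIdx := pvKey det
        if !(res.contains imgIdx) then res.insert imgIdx [det]
        else res.modify imgIdx [] (· ++ [det])) d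
      = (l.map (fun det => (pvKey det, det))).foldl
          (fun res p => res.modify p.1 [] (· ++ [p.2])) d := by
  simp only [pv_step_eq, List.foldl_map]

theorem pv_seen_eq (pairs : List (String × String)) :
    pairs.foldl (fun s p => if s.contains p.1 then s else s ++ [p.1]) ([] : List String)
      = PySem.Set.ofList (pairs.map (·.1)) := by
  rw [PySem.Set.ofList_eq_foldl, List.foldl_map]
  simp [PySem.Set.add, PySem.Set.contains_eq_listContains]

theorem transform_spec' (l : List String) : transform l = transform_alt l := by
  show (l.foldl (fun res det =>
      let imgIdx := pvKey det
      if !(res.contains imgIdx) then res.insert imgIdx [det]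
      else res.modify imgIdx [] (· ++ [det]))
    (PySem.Dict.empty : PySem.Dict String (List String))).items
    = ((l.map (fun det => (pvKey det, det))).foldl
        (fun s p => if s.contains p.1 then s else s ++ [p.1]) ([] : List String)).map
        (fun k => (k, ((l.map (fun det => (pvKey det, det))).filter (fun p => p.1 == k)).map (·.2)))
  rw [pv_foldl_eq, pv_seen_eq]
  set pairs := l.map (fun det => (pvKey det, det)) with hp
  have hnd : ((pairs.foldl (fun res p => res.modify p.1 [] (· ++ [p.2]))
      (PySem.Dict.empty : PySem.Dict String (List String))).keys).Nodup :=
    PySem.Dict.nodup_keys_foldl_modify_key pairs Prod.fst [] (fun res p => (· ++ [p.2])) _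
      PySem.Dict.nodup_keys_empty
  rw [PySem.Dict.items_eq_map_keys _ hnd []]
  have hkeys : (pairs.foldl (fun res p => res.modify p.1 [] (· ++ [p.2]))
      (PySem.Dict.empty : PySem.Dict String (List String))).keys
      = PySem.Set.ofList (pairs.map (·.1)) := by
    rw [PySem.Dict.keys_foldl_modify_key pairs Prod.fst [] (fun res p => (· ++ [p.2]))]
    simp [PySem.Dict.keys_empty, PySem.Set.update, PySem.Set.ofList_eq_foldl]
  rw [hkeys]
  refine List.map_congr_left (fun k _ => ?_)
  rw [PySem.Dict.getD_foldl_modify_append]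
  simp [PySem.Dict.getD_empty]

-- ===== VERDICT (by name: the statement is the Claim_ definition above) =====
theorem transform_spec : Claim_equal_transform := by
  intro l _ _
  exact transform_spec' l
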